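-- pv_equiv track=rewrite | github.com/hyeon0208/CodingTest | programmers/lv2/대충만든자판.py | solution
-- ===== SOURCE A (Python) =====
-- def solution(keymap, targets):
--     answer = []
--     dict = {}
--
--     for keys in keymap:
--         for i, k in enumerate(keys):
--             if k not in dict:
--                 dict[k] = i + 1
--             else:
--                 dict[k] = min(dict[k], i + 1)
--
--     for target in targets:
--         cnt = 0
--         for k in target:
--             if k not in dict:
--                 cnt = -1
--                 break
--             cnt += dict[k]
--         answer.append(cnt)
--
--     return answer
-- ===== SOURCE B (Python) =====
-- def solution(keymap, targets):
--     # dict-free lookup: the cost of a character is computed on demand by scanning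
--     # keymap with str.find (first occurrence = min position), memoised per character
--     cache = {}
--
--     def cost(ch):
--         if ch not in cache:
--             found = [p for p in (key.find(ch) for key in keymap) if p != -1]
--             cache[ch] = min(found) + 1 if found else -1
--         return cache[ch]
--
--     answer = []
--     for target in targets:
--         costs = [cost(ch) for ch in target]
--         answer.append(-1 if -1 in costs else sum(costs))
--     return answer
-- ===== Notes on version B (the rewrite author's own statement) =====
-- stated objective: alternative
-- what changed: B drops A's precomputed min-position dict: each target character's cost is computed on demand by scanning keymap with str.find (first occurrence = min position), filtering out misses and taking min(found)+1, memoised per character; a target is -1 iff any per-char cost is -1, else the cost list is summed.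
import Mathlib
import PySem

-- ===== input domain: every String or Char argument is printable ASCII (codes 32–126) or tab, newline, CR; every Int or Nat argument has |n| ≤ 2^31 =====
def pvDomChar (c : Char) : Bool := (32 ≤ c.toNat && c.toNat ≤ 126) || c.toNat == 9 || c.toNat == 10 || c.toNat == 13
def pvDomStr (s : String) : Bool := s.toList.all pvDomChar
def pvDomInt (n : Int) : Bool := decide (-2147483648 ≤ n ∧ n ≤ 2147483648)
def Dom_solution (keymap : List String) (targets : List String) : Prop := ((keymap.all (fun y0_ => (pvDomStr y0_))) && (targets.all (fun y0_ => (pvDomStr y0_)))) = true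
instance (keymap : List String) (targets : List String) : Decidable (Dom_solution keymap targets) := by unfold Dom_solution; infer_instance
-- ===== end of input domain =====

-- B replaces A's precomputed min-position dict with on-demand per-character str.find
-- scans over keymap (memoised), a structurally different computation of the same values.

-- ===== PORT A =====
-- inner scoring loop of A: cnt accumulator, break-on-missing as immediate -1
def scoreA (d : PySem.Dict Char Int) : List Char → Int → Int
  | [], cnt => cnt
  | k :: ks, cnt =>
    match d.get? k with
    | none => -1
    | some v => scoreA d ks (cnt + v)

def solution (keymap : List String) (targets : List String) : List Int :=
  let d := keymap.foldl (fun d keys =>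
    (PySem.List.enumerate keys.toList 0).foldl (fun d p =>
      match d.get? p.2 with
      | none => d.insert p.2 (p.1 + 1)
      | some v => d.insert p.2 (min v (p.1 + 1))) d) PySem.Dict.empty
  targets.foldl (fun answer target => answer ++ [scoreA d target.toList 0]) []

-- ===== PORT B =====
-- B: no precomputed dict; a character's cost is found by scanning keymap with str.find,
-- memoised in a cache threaded through the loops
def lookupB (keymap : List String) (cache : PySem.Dict Char Int) (ch : Char) :
    PySem.Dict Char Int × Int :=
  match cache.get? ch with
  | some v => (cache, v)
  | none =>
    let found := (keymap.map (fun key => PySem.Str.find key (String.ofList [ch]))).filter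
      (fun p => !(p == (-1 : Int)))
    let v : Int := match PySem.List.min? found (fun x => x) with
      | some m => m + 1
      | none => -1
    (cache.insert ch v, v)

def solution_alt (keymap : List String) (targets : List String) : List Int :=
  (targets.foldl (fun (acc : PySem.Dict Char Int × List Int) target =>
    let r := target.toList.foldl (fun (p : PySem.Dict Char Int × List Int) ch =>
      let q := lookupB keymap p.1 ch
      (q.1, p.2 ++ [q.2])) (acc.1, [])
    (r.1, acc.2 ++ [if (-1 : Int) ∈ r.2 then -1 else r.2.sum])) (PySem.Dict.empty, [])).2

-- ===== PRECONDITION & SPEC =====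
def Spec_solution (keymap : List String) (targets : List String) (out : List Int) : Prop := out = solution_alt keymap targets
instance (keymap : List String) (targets : List String) (out : List Int) : Decidable (Spec_solution keymap targets out) := by unfold Spec_solution; infer_instance

-- ===== CLAIM (what is proved, stated in full; the proofs are below) =====
def Claim_equal_solution : Prop := ∀ (keymap : List String) (targets : List String), Dom_solution keymap targets → Spec_solution keymap targets (solution keymap targets)

-- ===== LEMMAS AND PROOFS =====

-- pure per-character cost (what lookupB computes and caches)
def costB (keymap : List String) (ch : Char) : Int :=
  let found := (keymap.map (fun key => PySem.Str.find key (String.ofList [ch]))).filter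
    (fun p => !(p == (-1 : Int)))
  match PySem.List.min? found (fun x => x) with
  | some m => m + 1
  | none => -1

-- every cached value is the pure cost
def cacheInv (keymap : List String) (cache : PySem.Dict Char Int) : Prop :=
  ∀ c v, cache.get? c = some v → v = costB keymap c

theorem lookupB_snd (keymap : List String) (cache : PySem.Dict Char Int) (ch : Char)
    (h : cacheInv keymap cache) : (lookupB keymap cache ch).2 = costB keymap ch := by
  unfold lookupB
  cases hc : cache.get? ch with
  | some v => exact h ch v hc
  | none => rfl

theorem lookupB_inv (keymap : List String) (cache : PySem.Dict Char Int) (ch : Char)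
    (h : cacheInv keymap cache) : cacheInv keymap (lookupB keymap cache ch).1 := by
  unfold lookupB
  cases hc : cache.get? ch with
  | some v => exact h
  | none =>
    intro c v hv
    by_cases hcc : c = ch
    · subst hcc
      rw [PySem.Dict.get?_insert_self] at hv
      simp only [Option.some.injEq] at hv
      rw [← hv]
      rfl
    · rw [PySem.Dict.get?_insert_of_ne _ _ hcc] at hv
      exact h c v hv

theorem inner_fold (keymap : List String) (chars : List Char) :
    ∀ (cache : PySem.Dict Char Int) (costs : List Int), cacheInv keymap cache →
    (chars.foldl (fun (p : PySem.Dict Char Int × List Int) ch =>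
      let q := lookupB keymap p.1 ch
      (q.1, p.2 ++ [q.2])) (cache, costs)).2 = costs ++ chars.map (costB keymap)
    ∧ cacheInv keymap (chars.foldl (fun (p : PySem.Dict Char Int × List Int) ch =>
      let q := lookupB keymap p.1 ch
      (q.1, p.2 ++ [q.2])) (cache, costs)).1 := by
  induction chars with
  | nil => intro cache costs h; exact ⟨by simp, h⟩
  | cons ch cs ih =>
    intro cache costs h
    simp only [List.foldl_cons]
    obtain ⟨ha, hb⟩ := ih (lookupB keymap cache ch).1 (costs ++ [(lookupB keymap cache ch).2])
      (lookupB_inv keymap cache ch h)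
    refine ⟨?_, hb⟩
    rw [ha, lookupB_snd keymap cache ch h]
    simp

theorem outer_fold (keymap : List String) (ts : List String) :
    ∀ (cache : PySem.Dict Char Int) (answer : List Int), cacheInv keymap cache →
    (ts.foldl (fun (acc : PySem.Dict Char Int × List Int) target =>
      let r := target.toList.foldl (fun (p : PySem.Dict Char Int × List Int) ch =>
        let q := lookupB keymap p.1 ch
        (q.1, p.2 ++ [q.2])) (acc.1, [])
      (r.1, acc.2 ++ [if (-1 : Int) ∈ r.2 then -1 else r.2.sum])) (cache, answer)).2
    = answer ++ ts.map (fun t =>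
        if (-1 : Int) ∈ t.toList.map (costB keymap) then -1
        else (t.toList.map (costB keymap)).sum) := by
  induction ts with
  | nil => intro cache answer h; simp
  | cons t ts ih =>
    intro cache answer h
    simp only [List.foldl_cons]
    obtain ⟨ha, hb⟩ := inner_fold keymap t.toList cache [] h
    simp only [List.nil_append] at ha
    rw [ih _ _ hb, ha]
    simp

-- min of two optional candidates (none = absent)
def omin : Option Int → Option Int → Option Int
  | none, b => b
  | some a, none => some a
  | some a, some b => some (min a b)

-- the canonical "minimal key position of ch across keymap, +1" both programs compute
def M (keymap : List String) (ch : Char) : Option Int :=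
  keymap.foldl (fun o key =>
    omin o ((PySem.List.index? key.toList ch).map (fun j : Nat => (j : Int) + 1))) none

theorem omin_none_right (o : Option Int) : omin o none = o := by cases o <;> rfl

theorem singleton_prefix_iff (c : Char) (l : List Char) : [c] <+: l ↔ l.head? = some c := by
  constructor
  · rintro ⟨t, rfl⟩; rfl
  · intro h
    cases l with
    | nil => simp at h
    | cons x xs => simp at h; subst h; exact ⟨xs, rfl⟩

theorem find_singleton (s : List Char) (c : Char) :
    PySem.Chars.find s [c] = match PySem.List.index? s c with
      | none => -1
      | some j => (j : Int) := by
  cases hidx : PySem.List.index? s c with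
  | none =>
    have hmem : c ∉ s := (PySem.List.index?_eq_none_iff s c).mp hidx
    rw [PySem.Chars.find_eq_neg_one_iff, List.singleton_infix_iff]
    exact hmem
  | some j =>
    obtain ⟨hj, hsj, hmin⟩ := PySem.List.getElem_of_index?_eq_some hidx
    have hmem : c ∈ s := hsj ▸ List.getElem_mem hj
    have hinf : [c] <:+: s := (List.singleton_infix_iff c s).mpr hmem
    have h0 : 0 ≤ PySem.Chars.find s [c] := (PySem.Chars.find_nonneg_iff s [c]).mpr hinf
    obtain ⟨hpre, hfirst⟩ := PySem.Chars.find_spec h0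
    have hat : s[(PySem.Chars.find s [c]).toNat]? = some c := by
      rw [← List.head?_drop]; exact (singleton_prefix_iff c _).mp hpre
    have heq : (PySem.Chars.find s [c]).toNat = j := by
      rcases Nat.lt_trichotomy (PySem.Chars.find s [c]).toNat j with h | h | h
      · rw [List.getElem?_eq_getElem (Nat.lt_trans h hj)] at hat
        simp only [Option.some.injEq] at hat
        exact absurd hat (hmin _ h)
      · exact h
      · exfalso
        apply hfirst j h
        rw [singleton_prefix_iff, List.head?_drop, List.getElem?_eq_getElem hj, hsj]
    show PySem.Chars.find s [c] = ((j : Nat) : Int)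
    omega

theorem dict_inner (cs : List Char) (c : Char) : ∀ (n : Int) (d : PySem.Dict Char Int),
    ((PySem.List.enumerate cs n).foldl (fun d p =>
      match d.get? p.2 with
      | none => d.insert p.2 (p.1 + 1)
      | some v => d.insert p.2 (min v (p.1 + 1))) d).get? c
    = omin (d.get? c) ((PySem.List.index? cs c).map (fun j : Nat => n + (j : Int) + 1)) := by
  induction cs with
  | nil =>
    intro n d
    rw [PySem.List.enumerate_nil]
    simp [PySem.List.index?_eq_idxOf?, omin_none_right]
  | cons k ks ih =>
    intro n d
    rw [PySem.List.enumerate_cons]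
    simp only [List.foldl_cons]
    by_cases hck : k = c
    · subst hck
      have hstep : ((match d.get? k with
          | none => d.insert k (n + 1)
          | some v => d.insert k (min v (n + 1))) : PySem.Dict Char Int).get? k
          = omin (d.get? k) (some (n + 1)) := by
        cases hdc : d.get? k <;> simp [PySem.Dict.get?_insert_self, omin]
      rw [ih (n + 1) _, hstep]
      rw [PySem.List.index?_cons_self]
      cases hrest : PySem.List.index? ks k with
      | none => simp [omin_none_right]
      | some j =>
        simp only [Option.map_some]
        cases hdc : d.get? k <;> simp only [omin]
        · congr 1
          have h1 : n + 1 ≤ n + 1 + (j : Int) + 1 := by omega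
          rw [min_eq_left h1]
          norm_num
        · congr 1
          rename_i v
          have h1 : min v (n + 1) ≤ n + 1 + (j : Int) + 1 := by
            calc min v (n + 1) ≤ n + 1 := min_le_right _ _
            _ ≤ _ := by omega
          rw [min_eq_left h1]
          norm_num
    · have hstep : ((match d.get? k with
          | none => d.insert k (n + 1)
          | some v => d.insert k (min v (n + 1))) : PySem.Dict Char Int).get? c
          = d.get? c := by
        cases hdk : d.get? k <;> simp [PySem.Dict.get?_insert_of_ne _ _ (fun h => hck h.symm)]
      rw [ih (n + 1) _, hstep]
      rw [PySem.List.index?_cons_of_ne ks hck]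
      cases hrest : PySem.List.index? ks c with
      | none => rfl
      | some j =>
        simp only [Option.map_some]
        congr 2
        push_cast
        ring

theorem dict_eq_M (keymap : List String) (c : Char) :
    (keymap.foldl (fun d keys =>
      (PySem.List.enumerate keys.toList 0).foldl (fun d p =>
        match d.get? p.2 with
        | none => d.insert p.2 (p.1 + 1)
        | some v => d.insert p.2 (min v (p.1 + 1))) d) PySem.Dict.empty).get? c
    = M keymap c := by
  suffices h : ∀ (d : PySem.Dict Char Int),
      (keymap.foldl (fun d keys =>
        (PySem.List.enumerate keys.toList 0).foldl (fun d p =>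
          match d.get? p.2 with
          | none => d.insert p.2 (p.1 + 1)
          | some v => d.insert p.2 (min v (p.1 + 1))) d) d).get? c
      = keymap.foldl (fun o key =>
          omin o ((PySem.List.index? key.toList c).map (fun j : Nat => (j : Int) + 1))) (d.get? c) by
    rw [h PySem.Dict.empty, M]
    simp [PySem.Dict.get?_empty]
  induction keymap with
  | nil => intro d; rfl
  | cons key keys ih =>
    intro d
    simp only [List.foldl_cons]
    rw [ih, dict_inner key.toList c 0 d]
    congr 1
    cases PySem.List.index? key.toList c <;> simp

theorem M_pos (keymap : List String) (c : Char) (v : Int) (h : M keymap c = some v) : 1 ≤ v := by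
  rw [M] at h
  suffices hgen : ∀ (o : Option Int), (∀ w, o = some w → 1 ≤ w) →
      ∀ w, keymap.foldl (fun o key =>
        omin o ((PySem.List.index? key.toList c).map (fun j : Nat => (j : Int) + 1))) o = some w → 1 ≤ w by
    exact hgen none (by intro w hw; cases hw) v h
  clear h
  induction keymap with
  | nil => intro o ho w hw; exact ho w hw
  | cons key keys ih =>
    intro o ho w hw
    rw [List.foldl_cons] at hw
    refine ih _ ?_ w hw
    intro u hu
    cases hidx : PySem.List.index? key.toList c with
    | none => rw [hidx] at hu; simp only [Option.map_none, omin_none_right] at hu; exact ho u hu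
    | some j =>
      rw [hidx] at hu
      cases o with
      | none => simp [omin] at hu; omega
      | some a =>
        simp only [Option.map_some, omin, Option.some.injEq] at hu
        have ha := ho a rfl
        have hjn : (0:Int) ≤ (j:Int) := Int.natCast_nonneg j
        subst hu
        rcases min_cases a ((j:Int)+1) with ⟨h1, _⟩ | ⟨h1, _⟩ <;> rw [h1] <;> omega

theorem omin_assoc (a b c : Option Int) : omin (omin a b) c = omin a (omin b c) := by
  cases a <;> cases b <;> cases c <;> simp [omin, min_assoc]

theorem foldl_min_pull (t : List Int) : ∀ a b, t.foldl min (min a b) = min a (t.foldl min b) := by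
  induction t with
  | nil => intro a b; rfl
  | cons y ys ih =>
    intro a b
    simp only [List.foldl_cons, min_assoc]
    exact ih a (min b y)

theorem fold_cand_eq_min? (fs : List Int) : ∀ (o : Option Int),
    fs.foldl (fun o f => omin o (if f = -1 then none else some (f + 1))) o
    = omin o ((PySem.List.min? (fs.filter (fun p => !(p == (-1 : Int)))) (fun x => x)).map
        (fun m => m + 1)) := by
  induction fs with
  | nil =>
    intro o
    simp only [List.foldl_nil, List.filter_nil]
    rw [(PySem.List.min?_eq_none_iff _ _).mpr rfl]
    simp [omin_none_right]
  | cons f rest ih =>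
    intro o
    by_cases hf : f = -1
    · subst hf
      simp only [List.foldl_cons, List.filter_cons]
      norm_num [omin_none_right]
      exact ih o
    · have hfb : (!(f == (-1 : Int))) = true := by simp [hf]
      simp only [List.foldl_cons, if_neg hf, List.filter_cons, hfb, if_pos]
      rw [ih, omin_assoc]
      congr 1
      cases hfr : rest.filter (fun p => !(p == (-1 : Int))) with
      | nil =>
        rw [(PySem.List.min?_eq_none_iff _ _).mpr rfl, PySem.List.min?_id_cons]
        simp [omin]
      | cons x t =>
        rw [PySem.List.min?_id_cons, PySem.List.min?_id_cons]
        simp only [Option.map_some, omin, List.foldl_cons]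
        rw [foldl_min_pull, Int.min_add_right]

theorem costB_eq_M (keymap : List String) (c : Char) :
    costB keymap c = match M keymap c with
      | none => -1
      | some v => v := by
  have h2 := fold_cand_eq_min? (keymap.map (fun key => PySem.Str.find key (String.ofList [c]))) none
  rw [List.foldl_map] at h2
  have h3 : M keymap c = keymap.foldl (fun o key =>
      omin o (if PySem.Str.find key (String.ofList [c]) = -1 then none
        else some (PySem.Str.find key (String.ofList [c]) + 1))) none := by
    rw [M]
    apply List.foldl_ext
    intro o key hk
    have hfind : PySem.Str.find key (String.ofList [c]) = PySem.Chars.find key.toList [c] := by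
      simp
    rw [hfind, find_singleton]
    cases hidx : PySem.List.index? key.toList c with
    | none => simp
    | some j =>
      have hne : ((j : Nat) : Int) ≠ -1 := by omega
      simp [hne]
  unfold costB
  rw [h3, h2]
  show (match (PySem.List.min? _ (fun x => x)) with
    | some m => m + 1
    | none => (-1 : Int)) = _
  cases hmin : PySem.List.min? ((keymap.map (fun key =>
      PySem.Str.find key (String.ofList [c]))).filter (fun p => !(p == (-1 : Int)))) (fun x => x) <;>
    simp [omin]

-- A's break-based accumulator loop as an Option-sum over M
def scoreOpt (keymap : List String) : List Char → Option Int
  | [] => some 0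
  | k :: ks =>
    match M keymap k with
    | none => none
    | some v => (scoreOpt keymap ks).map (fun s => v + s)

theorem scoreA_eq (keymap : List String) (d : PySem.Dict Char Int)
    (hd : ∀ c, d.get? c = M keymap c) (cs : List Char) : ∀ cnt : Int,
    scoreA d cs cnt = (match scoreOpt keymap cs with
      | none => -1
      | some s => cnt + s) := by
  induction cs with
  | nil => intro cnt; simp [scoreA, scoreOpt]
  | cons k ks ih =>
    intro cnt
    simp only [scoreA, scoreOpt, hd k]
    cases h : M keymap k with
    | none => rfl
    | some v =>
      dsimp only
      rw [ih (cnt + v)]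
      cases hs : scoreOpt keymap ks <;> simp [Int.add_assoc]

theorem neg_one_mem_iff (keymap : List String) (cs : List Char) :
    ((-1 : Int) ∈ cs.map (costB keymap)) ↔ scoreOpt keymap cs = none := by
  induction cs with
  | nil => simp [scoreOpt]
  | cons k ks ih =>
    simp only [List.map_cons, List.mem_cons, scoreOpt]
    cases h : M keymap k with
    | none =>
      have hc : costB keymap k = -1 := by rw [costB_eq_M, h]
      simp [hc]
    | some v =>
      have hv := M_pos keymap k v h
      have hc : costB keymap k = v := by rw [costB_eq_M, h]
      rw [hc]
      constructor
      · rintro (h1 | h1)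
        · omega
        · rw [ih.mp h1]; rfl
      · intro h1
        right
        apply ih.mpr
        cases hsk : scoreOpt keymap ks with
        | none => rfl
        | some t => rw [hsk] at h1; cases h1

theorem sum_eq (keymap : List String) (cs : List Char) : ∀ s : Int,
    scoreOpt keymap cs = some s → (cs.map (costB keymap)).sum = s := by
  induction cs with
  | nil =>
    intro s hs
    simp only [scoreOpt, Option.some.injEq] at hs
    simp [← hs]
  | cons k ks ih =>
    intro s hs
    simp only [scoreOpt] at hs
    cases h : M keymap k with
    | none => rw [h] at hs; cases hs
    | some v =>
      rw [h] at hs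
      cases hsk : scoreOpt keymap ks with
      | none => rw [hsk] at hs; cases hs
      | some t =>
        rw [hsk] at hs
        simp only [Option.map_some, Option.some.injEq] at hs
        have hc : costB keymap k = v := by rw [costB_eq_M, h]
        simp only [List.map_cons, List.sum_cons, hc, ih t hsk]
        omega

theorem scoreB_eq (keymap : List String) (cs : List Char) :
    (if (-1 : Int) ∈ cs.map (costB keymap) then -1 else (cs.map (costB keymap)).sum)
    = (match scoreOpt keymap cs with
      | none => -1
      | some s => s) := by
  by_cases hm : (-1 : Int) ∈ cs.map (costB keymap)
  · rw [if_pos hm, (neg_one_mem_iff keymap cs).mp hm]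
  · rw [if_neg hm]
    cases hs : scoreOpt keymap cs with
    | none => exact absurd ((neg_one_mem_iff keymap cs).mpr hs) hm
    | some s => exact sum_eq keymap cs s hs

-- ===== VERDICT (by name: the statement is the Claim_ definition above) =====
theorem solution_spec : Claim_equal_solution := by
  intro keymap targets _
  unfold Spec_solution solution solution_alt
  rw [PySem.List.foldl_append_singleton_eq_map]
  rw [outer_fold keymap targets PySem.Dict.empty []
    (by intro c v hv; rw [PySem.Dict.get?_empty] at hv; cases hv)]
  simp only [List.nil_append]
  apply List.map_congr_left
  intro t _
  rw [scoreA_eq keymap _ (fun c => dict_eq_M keymap c) t.toList 0, scoreB_eq]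
  cases scoreOpt keymap t.toList <;> simp
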